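-- pv_equiv track=rewrite | github.com/SymbioticLab/ModelKeeper | ray_tune/oort/matchingopt.py | split_inputs
-- ===== SOURCE A (Python) =====
-- def split_inputs(in_list):
--     # input list may contain trainable weights
--     input_nodes = []
--     layer_name = None
--
--     for _input in in_list:
--         # tensor nodes are numeric by default
--         if _input.isnumeric():
--             input_nodes.append(_input)
--         # in onnx model, weight comes ahead of other trainable weights
--         # in some cases, bias itself may be a tensor
--         elif '.weight' in _input:
--             layer_name = _input
--             break
--         elif '.bias' in _input:
--             layer_name = _input
--             break
--
--     return input_nodes, layer_name
-- ===== SOURCE B (Python) =====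
-- def split_inputs(in_list):
--     # Two-pass: locate the first trainable-weight element (the cut), then
--     # filter the prefix for numeric tensor nodes.
--     cut = len(in_list)
--     layer_name = None
--     for i, x in enumerate(in_list):
--         if x.isnumeric():
--             continue
--         if '.weight' in x or '.bias' in x:
--             cut = i
--             layer_name = x
--             break
--     return [x for x in in_list[:cut] if x.isnumeric()], layer_name
-- ===== Notes on version B (the rewrite author's own statement) =====
-- stated objective: alternative
-- what changed: Replaces the single accumulate-and-break loop with a two-pass decomposition: first find the cut index of the first '.weight'/'.bias' element, then filter the prefix before the cut for numeric nodes.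
import Mathlib
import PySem

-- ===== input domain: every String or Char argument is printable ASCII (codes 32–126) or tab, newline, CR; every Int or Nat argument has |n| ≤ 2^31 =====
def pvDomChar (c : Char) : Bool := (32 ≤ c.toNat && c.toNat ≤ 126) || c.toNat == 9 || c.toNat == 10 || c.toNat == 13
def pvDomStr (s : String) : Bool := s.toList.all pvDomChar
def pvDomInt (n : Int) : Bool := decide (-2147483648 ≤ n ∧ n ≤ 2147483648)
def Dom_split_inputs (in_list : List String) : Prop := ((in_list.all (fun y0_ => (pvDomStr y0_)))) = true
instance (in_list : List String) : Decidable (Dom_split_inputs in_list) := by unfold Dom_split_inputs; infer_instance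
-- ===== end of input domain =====

-- B changes the decomposition: find the cut index of the first '.weight'/'.bias'
-- element, then filter the prefix for numeric nodes (alternative, not faster).
-- On the ASCII domain str.isnumeric() coincides with PySem.Str.strIsdigit (exact here).

-- ===== PORT A =====
-- single accumulate-and-break loop, as structural recursion over the list
def split_inputs (in_list : List String) : List String × Option String :=
  match in_list with
  | [] => ([], none)
  | x :: rest =>
    if PySem.Str.strIsdigit x then
      let r := split_inputs rest
      (x :: r.1, r.2)
    else if PySem.Str.isIn ".weight" x then ([], some x)
    else if PySem.Str.isIn ".bias" x then ([], some x)
    else split_inputs rest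

-- ===== PORT B =====
-- first pass of Source B: enumerate-and-break finding the cut index and layer name
def pvFindCut (xs : List String) (i : Int) : Int × Option String :=
  match xs with
  | [] => (i + xs.length, none)   -- cut defaults to len(in_list)
  | x :: rest =>
    if PySem.Str.strIsdigit x then pvFindCut rest (i + 1)
    else if PySem.Str.isIn ".weight" x || PySem.Str.isIn ".bias" x then (i, some x)
    else pvFindCut rest (i + 1)

def split_inputs_alt (in_list : List String) : List String × Option String :=
  let r := pvFindCut in_list 0
  ((PySem.List.slice in_list none (some r.1)).filter PySem.Str.strIsdigit, r.2)

-- ===== PRECONDITION & SPEC =====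
def Spec_split_inputs (in_list : List String) (out : List String × Option String) : Prop := out = split_inputs_alt in_list
instance (in_list : List String) (out : List String × Option String) : Decidable (Spec_split_inputs in_list out) := by unfold Spec_split_inputs; infer_instance

-- ===== CLAIM (what is proved, stated in full; the proofs are below) =====
def Claim_equal_split_inputs : Prop := ∀ (in_list : List String), Dom_split_inputs in_list → Spec_split_inputs in_list (split_inputs in_list)

-- ===== LEMMAS AND PROOFS =====

theorem pvFindCut_shift (xs : List String) (i : Int) :
    pvFindCut xs (i + 1) = ((pvFindCut xs i).1 + 1, (pvFindCut xs i).2) := by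
  induction xs generalizing i with
  | nil => simp [pvFindCut]
  | cons x rest ih =>
    simp only [pvFindCut]
    split_ifs with h1 h2
    · exact ih (i + 1)
    · rfl
    · exact ih (i + 1)

theorem pvFindCut_nonneg (xs : List String) :
    0 ≤ (pvFindCut xs 0).1 := by
  induction xs with
  | nil => simp [pvFindCut]
  | cons x rest ih =>
    simp only [pvFindCut]
    split_ifs with h1 h2
    · rw [show (0:Int) + 1 = 0 + 1 from rfl, pvFindCut_shift]; omega
    · simp
    · rw [show (0:Int) + 1 = 0 + 1 from rfl, pvFindCut_shift]; omega

theorem split_inputs_eq_take (xs : List String) :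
    split_inputs xs =
      ((xs.take (pvFindCut xs 0).1.toNat).filter PySem.Str.strIsdigit,
       (pvFindCut xs 0).2) := by
  induction xs with
  | nil => simp [split_inputs, pvFindCut]
  | cons x rest ih =>
    simp only [split_inputs, pvFindCut]
    by_cases h1 : PySem.Str.strIsdigit x = true
    · rw [if_pos h1, if_pos h1]
      rw [show (0:Int) + 1 = 0 + 1 from rfl, pvFindCut_shift]
      have hn := pvFindCut_nonneg rest
      have ht : ((pvFindCut rest 0).1 + 1).toNat = (pvFindCut rest 0).1.toNat + 1 := by omega
      rw [ht]
      simp only [PySem.Str.strIsdigit_eq] at h1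
      simp [List.take_succ_cons, List.filter_cons, h1, ih]
    · by_cases h2 : PySem.Str.isIn ".weight" x = true
      · rw [if_neg h1, if_pos h2, if_neg h1, if_pos (by rw [h2]; simp : (PySem.Str.isIn ".weight" x || PySem.Str.isIn ".bias" x) = true)]
        simp
      · by_cases h3 : PySem.Str.isIn ".bias" x = true
        · rw [if_neg h1, if_neg h2, if_pos h3, if_neg h1,
              if_pos (by rw [h3]; simp : (PySem.Str.isIn ".weight" x || PySem.Str.isIn ".bias" x) = true)]
          simp
        · have hor : ¬ ((PySem.Str.isIn ".weight" x || PySem.Str.isIn ".bias" x) = true) := by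
            simp only [Bool.or_eq_true]; tauto
          rw [if_neg h1, if_neg h2, if_neg h3, if_neg h1, if_neg hor]
          rw [show (0:Int) + 1 = 0 + 1 from rfl, pvFindCut_shift]
          have hn := pvFindCut_nonneg rest
          have ht : ((pvFindCut rest 0).1 + 1).toNat = (pvFindCut rest 0).1.toNat + 1 := by omega
          rw [ht]
          simp only [PySem.Str.strIsdigit_eq] at h1
          simp [List.take_succ_cons, List.filter_cons, h1, ih]

-- ===== VERDICT (by name: the statement is the Claim_ definition above) =====
theorem split_inputs_spec : Claim_equal_split_inputs := by
  intro in_list _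
  unfold Spec_split_inputs
  simp only [split_inputs_alt]
  rw [PySem.List.slice_to (hb := pvFindCut_nonneg in_list)]
  exact split_inputs_eq_take in_list
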